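-- pv_equiv track=rewrite | github.com/anveeksh/attack-path-predictor | backend/attack_path_predictor.py | _get_applicable_techniques
-- ===== SOURCE A (Python) =====
-- from typing import List, Dict, Tuple
--
-- def _get_applicable_techniques(source: Dict, target: Dict) -> List[str]:
--     """Get MITRE ATT&CK techniques applicable for this edge"""
--     techniques = []
--
--     for service in target.get('services', []):
--         if 'HTTP' in service or 'HTTPS' in service:
--             techniques.extend(['T1190 - Exploit Public-Facing Application',
--                              'T1059.007 - JavaScript'])
--         if 'SMB' in service:
--             techniques.extend(['T1021.002 - SMB/Windows Admin Shares',
--                              'T1550.002 - Pass the Hash'])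
--         if 'RDP' in service:
--             techniques.append('T1021.001 - Remote Desktop Protocol')
--         if 'MySQL' in service or 'SQL' in service:
--             techniques.append('T1190 - SQL Injection')
--
--     return techniques
-- ===== SOURCE B (Python) =====
-- _BY_BIT = (
--     ['T1190 - Exploit Public-Facing Application', 'T1059.007 - JavaScript'],
--     ['T1021.002 - SMB/Windows Admin Shares', 'T1550.002 - Pass the Hash'],
--     ['T1021.001 - Remote Desktop Protocol'],
--     ['T1190 - SQL Injection'],
-- )
-- # Four keywords suffice: 'HTTP' is a substring of 'HTTPS' and 'SQL' of 'MySQL',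
-- # so A's OR-tests collapse to one substring test per rule.
-- _KEYS = ('HTTP', 'SMB', 'RDP', 'SQL')
-- # Precomputed: for each of the 16 match-bitmasks, the concatenated technique list.
-- _TABLE = [
--     [t for b in range(4) if (m >> b) & 1 for t in _BY_BIT[b]]
--     for m in range(16)
-- ]
--
-- def _get_applicable_techniques(source, target):
--     """Get MITRE ATT&CK techniques applicable for this edge"""
--     out = []
--     for service in target.get('services', []):
--         m = 0
--         for b in range(4):
--             if _KEYS[b] in service:
--                 m |= 1 << b
--         out += _TABLE[m]
--     return out
-- ===== Notes on version B (the rewrite author's own statement) =====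
-- stated objective: alternative
-- what changed: Per service B computes a 4-bit match bitmask (using that 'HTTP' subsumes 'HTTPS' and 'SQL' subsumes 'MySQL') and appends a precomputed technique list from a 16-entry mask-indexed table, instead of A's four inline if-blocks each extending the accumulator.
import Mathlib
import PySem

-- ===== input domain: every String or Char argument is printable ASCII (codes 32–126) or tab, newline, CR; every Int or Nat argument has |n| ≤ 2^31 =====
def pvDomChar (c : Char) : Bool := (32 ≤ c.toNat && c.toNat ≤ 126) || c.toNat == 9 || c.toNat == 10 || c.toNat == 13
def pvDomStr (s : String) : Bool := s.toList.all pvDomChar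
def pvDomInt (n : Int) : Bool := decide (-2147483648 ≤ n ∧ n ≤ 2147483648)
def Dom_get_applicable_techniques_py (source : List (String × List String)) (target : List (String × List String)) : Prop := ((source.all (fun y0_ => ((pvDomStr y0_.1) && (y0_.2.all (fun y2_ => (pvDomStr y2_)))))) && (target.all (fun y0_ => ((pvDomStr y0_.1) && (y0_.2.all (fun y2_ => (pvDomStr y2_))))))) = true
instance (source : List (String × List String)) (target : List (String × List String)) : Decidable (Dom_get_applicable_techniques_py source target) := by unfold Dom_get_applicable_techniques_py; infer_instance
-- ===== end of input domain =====

-- B replaces A's four inline if-blocks by a per-service 4-bit match bitmask (one keyword per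
-- rule, since 'HTTP' subsumes 'HTTPS' and 'SQL' subsumes 'MySQL') indexing a precomputed
-- 16-entry table of concatenated technique lists; objective: alternative.

-- ===== PORT A =====
-- target.get('services', []): first matching key in the association list, default []
def pvGetServices (d : List (String × List String)) : List String :=
  ((d.find? (fun p => p.1 == "services")).map (·.2)).getD []

def get_applicable_techniques_py (source : List (String × List String)) (target : List (String × List String)) : List String :=
  (pvGetServices target).foldl (fun techniques service =>
    let t1 := if PySem.Str.isIn "HTTP" service || PySem.Str.isIn "HTTPS" service then
                techniques ++ ["T1190 - Exploit Public-Facing Application", "T1059.007 - JavaScript"]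
              else techniques
    let t2 := if PySem.Str.isIn "SMB" service then
                t1 ++ ["T1021.002 - SMB/Windows Admin Shares", "T1550.002 - Pass the Hash"]
              else t1
    let t3 := if PySem.Str.isIn "RDP" service then
                t2 ++ ["T1021.001 - Remote Desktop Protocol"]
              else t2
    if PySem.Str.isIn "MySQL" service || PySem.Str.isIn "SQL" service then
      t3 ++ ["T1190 - SQL Injection"]
    else t3) []

-- ===== PORT B =====
def pvByBit : List (List String) :=
  [ ["T1190 - Exploit Public-Facing Application", "T1059.007 - JavaScript"],
    ["T1021.002 - SMB/Windows Admin Shares", "T1550.002 - Pass the Hash"],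
    ["T1021.001 - Remote Desktop Protocol"],
    ["T1190 - SQL Injection"] ]

def pvKeys : List String := ["HTTP", "SMB", "RDP", "SQL"]

-- _TABLE: for each of the 16 bitmasks, the concatenated technique lists of the set bits
def pvTable : List (List String) :=
  (List.range 16).map (fun m =>
    (List.range 4).flatMap (fun b =>
      if (m >>> b) % 2 = 1 then pvByBit.getD b [] else []))

def pvMask (service : String) : Nat :=
  (List.range 4).foldl (fun m b =>
    if PySem.Str.isIn (pvKeys.getD b "") service then m ||| (1 <<< b) else m) 0

def get_applicable_techniques_py_alt (source : List (String × List String)) (target : List (String × List String)) : List String :=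
  (pvGetServices target).foldl (fun out service => out ++ pvTable.getD (pvMask service) []) []

-- ===== PRECONDITION & SPEC =====
def Spec_get_applicable_techniques_py (source : List (String × List String)) (target : List (String × List String)) (out : List String) : Prop := out = get_applicable_techniques_py_alt source target
instance (source : List (String × List String)) (target : List (String × List String)) (out : List String) : Decidable (Spec_get_applicable_techniques_py source target out) := by unfold Spec_get_applicable_techniques_py; infer_instance

-- ===== CLAIM (what is proved, stated in full; the proofs are below) =====
def Claim_equal_get_applicable_techniques_py : Prop := ∀ (source : List (String × List String)) (target : List (String × List String)), Dom_get_applicable_techniques_py source target → Spec_get_applicable_techniques_py source target (get_applicable_techniques_py source target)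

-- ===== LEMMAS AND PROOFS =====
-- 'HTTPS' in s implies 'HTTP' in s ('HTTP' is a prefix of 'HTTPS')
theorem pv_https_imp (s : String) :
    PySem.Str.isIn "HTTPS" s = true → PySem.Str.isIn "HTTP" s = true := by
  intro h
  rw [PySem.Str.isIn_iff_infix] at h ⊢
  exact List.IsInfix.trans (by decide) h

-- 'MySQL' in s implies 'SQL' in s ('SQL' is a suffix of 'MySQL')
theorem pv_mysql_imp (s : String) :
    PySem.Str.isIn "MySQL" s = true → PySem.Str.isIn "SQL" s = true := by
  intro h
  rw [PySem.Str.isIn_iff_infix] at h ⊢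
  exact List.IsInfix.trans (by decide) h

-- A's per-service step appends exactly B's table entry at the service's bitmask
theorem pvStep_eq (acc : List String) (s : String) :
    (let t1 := if PySem.Str.isIn "HTTP" s || PySem.Str.isIn "HTTPS" s then
                 acc ++ ["T1190 - Exploit Public-Facing Application", "T1059.007 - JavaScript"]
               else acc
     let t2 := if PySem.Str.isIn "SMB" s then
                 t1 ++ ["T1021.002 - SMB/Windows Admin Shares", "T1550.002 - Pass the Hash"]
               else t1
     let t3 := if PySem.Str.isIn "RDP" s then
                 t2 ++ ["T1021.001 - Remote Desktop Protocol"]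
               else t2
     if PySem.Str.isIn "MySQL" s || PySem.Str.isIn "SQL" s then
       t3 ++ ["T1190 - SQL Injection"]
     else t3) = acc ++ pvTable.getD (pvMask s) [] := by
  have hHS : PySem.Str.isIn "HTTP" s = false → PySem.Str.isIn "HTTPS" s = false := by
    intro h
    cases hx : PySem.Str.isIn "HTTPS" s
    · rfl
    · have ht := pv_https_imp s hx
      rw [h] at ht
      exact absurd ht (by decide)
  have hMy : PySem.Str.isIn "SQL" s = false → PySem.Str.isIn "MySQL" s = false := by
    intro h
    cases hx : PySem.Str.isIn "MySQL" s
    · rfl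
    · have ht := pv_mysql_imp s hx
      rw [h] at ht
      exact absurd ht (by decide)
  simp only [pvMask, pvKeys, List.range, List.range.loop, List.foldl, List.getD,
    List.getElem?_cons_zero, List.getElem?_cons_succ, Option.getD_some]
  rcases (PySem.Str.isIn "HTTP" s).eq_false_or_eq_true with h1 | h1 <;>
    rcases (PySem.Str.isIn "SMB" s).eq_false_or_eq_true with h2 | h2 <;>
    rcases (PySem.Str.isIn "RDP" s).eq_false_or_eq_true with h3 | h3 <;>
    rcases (PySem.Str.isIn "SQL" s).eq_false_or_eq_true with h4 | h4 <;>
    simp_all [pvTable, pvByBit, List.range, List.range.loop]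

-- ===== VERDICT (by name: the statement is the Claim_ definition above) =====
theorem get_applicable_techniques_py_spec : Claim_equal_get_applicable_techniques_py := by
  intro source target _
  show get_applicable_techniques_py source target = get_applicable_techniques_py_alt source target
  unfold get_applicable_techniques_py get_applicable_techniques_py_alt
  have hext : (pvGetServices target).foldl (fun techniques service =>
      let t1 := if PySem.Str.isIn "HTTP" service || PySem.Str.isIn "HTTPS" service then
                  techniques ++ ["T1190 - Exploit Public-Facing Application", "T1059.007 - JavaScript"]
                else techniques
      let t2 := if PySem.Str.isIn "SMB" service then
                  t1 ++ ["T1021.002 - SMB/Windows Admin Shares", "T1550.002 - Pass the Hash"]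
                else t1
      let t3 := if PySem.Str.isIn "RDP" service then
                  t2 ++ ["T1021.001 - Remote Desktop Protocol"]
                else t2
      if PySem.Str.isIn "MySQL" service || PySem.Str.isIn "SQL" service then
        t3 ++ ["T1190 - SQL Injection"]
      else t3) [] =
      (pvGetServices target).foldl (fun out s => out ++ pvTable.getD (pvMask s) []) [] :=
    List.foldl_ext _ _ [] (fun acc s _ => pvStep_eq acc s)
  rw [hext]
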